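-- pv_equiv track=rewrite | github.com/garyrayat/agent_jobby | jobb_latest.py | apply_priority
-- ===== SOURCE A (Python) =====
-- def apply_priority(loc):
--     l = loc.lower()
--     if "austin" in l: return 0
--     if any(x in l for x in ["dallas","houston","san antonio"]): return 1
--     if any(x in l for x in [", tx","texas","round rock","cedar park","buda"]): return 2
--     if any(x in l for x in ["remote","united states","usa","anywhere","nationwide"]): return 3
--     if any(x in l for x in ["new york","brooklyn","manhattan"]): return 4
--     if any(x in l for x in ["san francisco","mountain view","palo alto","sunnyvale","santa clara"]): return 5
--     if any(x in l for x in ["seattle","bellevue","redmond"]): return 6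
--     if any(x in l for x in ["boston","cambridge"]): return 7
--     if "chicago" in l: return 8
--     if any(x in l for x in ["washington","mclean","arlington"]): return 9
--     if any(x in l for x in ["stamford","greenwich","connecticut"]): return 10
--     if any(x in l for x in ["los angeles","irvine","san diego"]): return 11
--     return 12
-- ===== SOURCE B (Python) =====
-- # Flat keyword -> rank map; rank of a location = minimum rank among ALL matching
-- # keywords (no first-match branch chain), 12 if none match.
-- RANK = {
--     "austin": 0,
--     "dallas": 1, "houston": 1, "san antonio": 1,
--     ", tx": 2, "texas": 2, "round rock": 2, "cedar park": 2, "buda": 2,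
--     "remote": 3, "united states": 3, "usa": 3, "anywhere": 3, "nationwide": 3,
--     "new york": 4, "brooklyn": 4, "manhattan": 4,
--     "san francisco": 5, "mountain view": 5, "palo alto": 5, "sunnyvale": 5, "santa clara": 5,
--     "seattle": 6, "bellevue": 6, "redmond": 6,
--     "boston": 7, "cambridge": 7,
--     "chicago": 8,
--     "washington": 9, "mclean": 9, "arlington": 9,
--     "stamford": 10, "greenwich": 10, "connecticut": 10,
--     "los angeles": 11, "irvine": 11, "san diego": 11,
-- }
--
--
-- def apply_priority(loc):
--     l = loc.lower()
--     return min((r for k, r in RANK.items() if k in l), default=12)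
-- ===== Notes on version B (the rewrite author's own statement) =====
-- stated objective: alternative
-- what changed: The 12-branch first-match if/return chain is replaced by a flat keyword-to-rank map and a single min-aggregation: B returns the minimum rank over all matching keywords (default 12), which equals A's first-matching-group index because ranks are the group positions.
import Mathlib
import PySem

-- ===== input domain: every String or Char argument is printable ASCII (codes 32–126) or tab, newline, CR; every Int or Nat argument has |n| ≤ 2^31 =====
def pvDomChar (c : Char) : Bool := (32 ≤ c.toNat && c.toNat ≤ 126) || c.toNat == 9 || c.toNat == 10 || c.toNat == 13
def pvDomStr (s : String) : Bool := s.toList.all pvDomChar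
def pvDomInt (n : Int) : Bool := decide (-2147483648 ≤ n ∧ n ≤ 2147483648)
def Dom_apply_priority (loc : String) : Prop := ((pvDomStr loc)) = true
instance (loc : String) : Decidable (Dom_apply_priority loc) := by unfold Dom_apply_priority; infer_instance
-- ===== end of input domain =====

-- B replaces A's first-match if/return chain by a flat keyword→rank map aggregated with min over all matching keywords (default 12); an alternative algorithm of similar cost.

-- ===== PORT A =====
def apply_priority (loc : String) : Int :=
  let l := PySem.Str.lower loc
  if PySem.Str.isIn "austin" l then 0
  else if (["dallas","houston","san antonio"]).any (fun x => PySem.Str.isIn x l) then 1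
  else if ([", tx","texas","round rock","cedar park","buda"]).any (fun x => PySem.Str.isIn x l) then 2
  else if (["remote","united states","usa","anywhere","nationwide"]).any (fun x => PySem.Str.isIn x l) then 3
  else if (["new york","brooklyn","manhattan"]).any (fun x => PySem.Str.isIn x l) then 4
  else if (["san francisco","mountain view","palo alto","sunnyvale","santa clara"]).any (fun x => PySem.Str.isIn x l) then 5
  else if (["seattle","bellevue","redmond"]).any (fun x => PySem.Str.isIn x l) then 6
  else if (["boston","cambridge"]).any (fun x => PySem.Str.isIn x l) then 7
  else if PySem.Str.isIn "chicago" l then 8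
  else if (["washington","mclean","arlington"]).any (fun x => PySem.Str.isIn x l) then 9
  else if (["stamford","greenwich","connecticut"]).any (fun x => PySem.Str.isIn x l) then 10
  else if (["los angeles","irvine","san diego"]).any (fun x => PySem.Str.isIn x l) then 11
  else 12

-- ===== PORT B =====
-- the flat RANK dict of Source B (keys distinct, insertion order)
def pvRank : List (String × Int) :=
  [("austin", 0),
   ("dallas", 1), ("houston", 1), ("san antonio", 1),
   (", tx", 2), ("texas", 2), ("round rock", 2), ("cedar park", 2), ("buda", 2),
   ("remote", 3), ("united states", 3), ("usa", 3), ("anywhere", 3), ("nationwide", 3),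
   ("new york", 4), ("brooklyn", 4), ("manhattan", 4),
   ("san francisco", 5), ("mountain view", 5), ("palo alto", 5), ("sunnyvale", 5), ("santa clara", 5),
   ("seattle", 6), ("bellevue", 6), ("redmond", 6),
   ("boston", 7), ("cambridge", 7),
   ("chicago", 8),
   ("washington", 9), ("mclean", 9), ("arlington", 9),
   ("stamford", 10), ("greenwich", 10), ("connecticut", 10),
   ("los angeles", 11), ("irvine", 11), ("san diego", 11)]

-- min((r for k, r in RANK.items() if k in l), default=12)
def apply_priority_alt (loc : String) : Int :=
  let l := PySem.Str.lower loc
  PySem.List.minD ((pvRank.filter (fun p => PySem.Str.isIn p.1 l)).map (fun p => p.2)) (fun x => x) 12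

-- ===== PRECONDITION & SPEC =====
def Spec_apply_priority (loc : String) (out : Int) : Prop := out = apply_priority_alt loc
instance (loc : String) (out : Int) : Decidable (Spec_apply_priority loc out) := by unfold Spec_apply_priority; infer_instance

-- ===== CLAIM =====
def Claim_equal_apply_priority : Prop := ∀ (loc : String), Dom_apply_priority loc → Spec_apply_priority loc (apply_priority loc)

-- ===== LEMMAS AND PROOFS =====
-- A's groups, in branch order (proof-side view of A's chain)
def pvGroups : List (List String) :=
  [["austin"],
   ["dallas","houston","san antonio"],
   [", tx","texas","round rock","cedar park","buda"],
   ["remote","united states","usa","anywhere","nationwide"],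
   ["new york","brooklyn","manhattan"],
   ["san francisco","mountain view","palo alto","sunnyvale","santa clara"],
   ["seattle","bellevue","redmond"],
   ["boston","cambridge"],
   ["chicago"],
   ["washington","mclean","arlington"],
   ["stamford","greenwich","connecticut"],
   ["los angeles","irvine","san diego"]]

-- first index (from i) of a group with a matching keyword, start+length after the loop
def pvScanH (l : String) : List (List String) → Int → Int
  | [], i => i
  | g :: t, i => if g.any (fun x => PySem.Str.isIn x l) then i else pvScanH l t (i + 1)

-- flatten groups to (keyword, rank) pairs, ranks from i upward
def pvFlatWith : Int → List (List String) → List (String × Int)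
  | _, [] => []
  | i, g :: t => g.map (fun k => (k, i)) ++ pvFlatWith (i + 1) t

lemma pv_mem_flatWith {p : String × Int} : ∀ {gs : List (List String)} {i : Int}, p ∈ pvFlatWith i gs → i ≤ p.2 := by
  intro gs
  induction gs with
  | nil => intro i h; simp [pvFlatWith] at h
  | cons g t ih =>
    intro i h
    simp only [pvFlatWith, List.mem_append, List.mem_map] at h
    rcases h with ⟨k, _, rfl⟩ | h
    · exact le_refl _
    · have := ih h; omega

theorem pv_min?_id_eq_some {xs : List Int} {m : Int} (hm : m ∈ xs) (hlb : ∀ x ∈ xs, m ≤ x) :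
    PySem.List.min? xs (fun x => x) = some m := by
  cases h : PySem.List.min? xs (fun x => x) with
  | none => exact absurd ((PySem.List.min?_eq_none_iff xs _).mp h ▸ hm) (List.not_mem_nil)
  | some m' =>
    have h1 := PySem.List.min?_mem h
    have h2 := PySem.List.min?_isMin h m hm
    have h3 := hlb m' h1
    simp at h2
    simp only [Option.some.injEq]
    omega

lemma pv_scan_eq_min (l : String) : ∀ (gs : List (List String)) (i : Int),
    (PySem.List.min? (((pvFlatWith i gs).filter (fun p => PySem.Str.isIn p.1 l)).map (fun p => p.2)) (fun x => x)).getD (i + gs.length) = pvScanH l gs i := by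
  intro gs
  induction gs with
  | nil => intro i; simp [pvFlatWith, pvScanH, PySem.List.min?]
  | cons g t ih =>
    intro i
    simp only [pvScanH]
    cases hmatch : g.any (fun x => PySem.Str.isIn x l) with
    | true =>
      obtain ⟨k, hk, hkin⟩ := List.any_eq_true.mp hmatch
      have hmem : i ∈ ((pvFlatWith i (g :: t)).filter (fun p => PySem.Str.isIn p.1 l)).map (fun p => p.2) := by
        simp only [List.mem_map, List.mem_filter]
        refine ⟨(k, i), ⟨?_, hkin⟩, rfl⟩
        simp only [pvFlatWith, List.mem_append, List.mem_map]
        exact Or.inl ⟨k, hk, rfl⟩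
      have hlb : ∀ x ∈ ((pvFlatWith i (g :: t)).filter (fun p => PySem.Str.isIn p.1 l)).map (fun p => p.2), i ≤ x := by
        intro x hx
        simp only [List.mem_map, List.mem_filter] at hx
        obtain ⟨p, ⟨hp, _⟩, rfl⟩ := hx
        exact pv_mem_flatWith hp
      rw [pv_min?_id_eq_some hmem hlb]
      rfl
    | false =>
      simp only [Bool.false_eq_true, if_false]
      have hall := List.any_eq_false.mp hmatch
      have hfilter : (pvFlatWith i (g :: t)).filter (fun p => PySem.Str.isIn p.1 l)
          = (pvFlatWith (i + 1) t).filter (fun p => PySem.Str.isIn p.1 l) := by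
        simp only [pvFlatWith, List.filter_append]
        have h2 : ((g.map (fun k => (k, i))).filter (fun p => PySem.Str.isIn p.1 l)) = [] := by
          apply List.filter_eq_nil_iff.mpr
          intro p hp
          simp only [List.mem_map] at hp
          obtain ⟨k, hk, rfl⟩ := hp
          simpa using hall k hk
        rw [h2, List.nil_append]
      rw [hfilter]
      have := ih (i + 1)
      have harith : i + 1 + (t.length : Int) = i + ((g :: t).length : Int) := by simp; omega
      rw [harith] at this
      exact this

lemma pv_rank_eq_flat : pvRank = pvFlatWith 0 pvGroups := by rfl

lemma pv_A_eq_scan (loc : String) : apply_priority loc = pvScanH (PySem.Str.lower loc) pvGroups 0 := by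
  unfold apply_priority
  simp only [pvGroups, pvScanH, List.any_cons, List.any_nil, Bool.or_false]
  norm_num

-- ===== VERDICT =====
theorem apply_priority_spec : Claim_equal_apply_priority := by
  intro loc _
  unfold Spec_apply_priority
  rw [pv_A_eq_scan]
  unfold apply_priority_alt PySem.List.minD
  rw [pv_rank_eq_flat]
  have := pv_scan_eq_min (PySem.Str.lower loc) pvGroups 0
  norm_num [pvGroups] at this ⊢
  exact this.symm
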